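-- pv_equiv track=rewrite | github.com/Ananya-Kini/Cache-simulator | main.py | direct_mapping_simulation
-- ===== SOURCE A (Python) =====
-- from math import log2
--
-- def direct_mapping_simulation(cache_size, memory_size, block_size, memory_references):
--     hits, misses, evictions = 0, 0, 0
--     num_cache_lines = cache_size // block_size
--     cache = [None] * num_cache_lines
--     access_order = []  # Track access order of cache blocks
--
--     # Calculate number of index and offset bits
--     num_offset_bits = int(log2(block_size))
--     num_index_bits = int(log2(num_cache_lines))
--     num_tag_bits = int(log2(memory_size)) - num_offset_bits - num_index_bits
--
--     before_cache = ["-"] * num_cache_lines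
--
--     results = []
--
--     for reference in memory_references:
--         # Convert reference to binary
--         binary_address = bin(reference)[2:].zfill(32)
--
--         # Capture cache contents before processing current reference
--         before_cache_copy = list(cache)
--
--         # Calculate index, tag, and word offset
--         index = (reference // block_size) % num_cache_lines
--         tag = reference // (num_cache_lines * block_size)
--         word_offset = reference % block_size
--
--         # Check if the block is in the cache
--         if cache[index] == tag:
--             hits += 1
--             results.append((binary_address, "Hit"))
--         else:
--             if cache[index] is not None:  # Evict the block if the cache line is occupied
--                 evictions += 1
--             cache[index] = tag
--             misses += 1
--             results.append((binary_address, "Miss"))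
--
--         # Update cache access order
--         if index in access_order:
--             access_order.remove(index)
--         access_order.append(index)
--
--     # Update cache contents after processing current reference
--     after_cache = [f"Cache Line {i}: {hex(tag)}" if tag is not None else f"Cache Line {i}: Empty" for i, tag in enumerate(cache)]
--
--     return before_cache, after_cache, hits, misses, evictions
-- ===== SOURCE B (Python) =====
-- def direct_mapping_simulation(cache_size, memory_size, block_size, memory_references):
--     num_cache_lines = cache_size // block_size
--     # Group the tag stream per cache line in one pass, then simulate each line independently.
--     groups = {}
--     for reference in memory_references:
--         index = (reference // block_size) % num_cache_lines
--         groups.setdefault(index, []).append(reference // (num_cache_lines * block_size))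
--     hits, misses, evictions = 0, 0, 0
--     after_cache = []
--     for i in range(num_cache_lines):
--         stored = None
--         for tag in groups.get(i, []):
--             if stored == tag:
--                 hits += 1
--             else:
--                 if stored is not None:
--                     evictions += 1
--                 misses += 1
--                 stored = tag
--         if stored is None:
--             after_cache.append(f"Cache Line {i}: Empty")
--         else:
--             after_cache.append(f"Cache Line {i}: {hex(stored)}")
--     before_cache = ["-"] * num_cache_lines
--     return before_cache, after_cache, hits, misses, evictions
-- ===== Notes on version B (the rewrite author's own statement) =====
-- stated objective: alternative
-- what changed: B replaces A's sequential simulation over a mutable cache array with a group-by pass (dict: cache line -> ordered tag stream) followed by an independent per-line replay that produces each line's final content and counter deltas directly, dropping A's unused per-reference bin()/zfill string building and the linear access_order remove/append scans.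
import Mathlib
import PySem

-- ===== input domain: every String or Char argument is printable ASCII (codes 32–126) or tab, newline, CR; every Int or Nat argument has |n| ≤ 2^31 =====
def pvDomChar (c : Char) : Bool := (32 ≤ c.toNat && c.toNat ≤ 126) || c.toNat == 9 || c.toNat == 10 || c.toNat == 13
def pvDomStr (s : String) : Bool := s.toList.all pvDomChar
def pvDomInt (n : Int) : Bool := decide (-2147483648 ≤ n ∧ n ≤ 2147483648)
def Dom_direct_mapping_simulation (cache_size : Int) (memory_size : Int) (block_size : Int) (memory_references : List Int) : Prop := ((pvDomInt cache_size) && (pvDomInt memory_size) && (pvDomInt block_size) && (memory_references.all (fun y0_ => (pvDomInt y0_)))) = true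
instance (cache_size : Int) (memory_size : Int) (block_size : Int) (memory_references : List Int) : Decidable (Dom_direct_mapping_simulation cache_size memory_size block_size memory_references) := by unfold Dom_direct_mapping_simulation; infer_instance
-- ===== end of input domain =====

-- B regroups the reference stream per cache line (a dict of ordered tag lists) and replays each
-- line independently, instead of A's sequential walk over a mutable cache array; same return value.

-- hex(t): Python's hex() builtin, used by BOTH Pythons in the f-string for after_cache (exact for every Int)
def pyHex (t : Int) : String :=
  if t < 0 then "-0x" ++ String.mk (Nat.toDigits 16 (-t).toNat)
  else "0x" ++ String.mk (Nat.toDigits 16 t.toNat)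

-- index / tag of a reference (both Pythons compute these with the same expressions)
def dmsIdx (block_size n r : Int) : Int := PySem.Int.mod (PySem.Int.floordiv r block_size) n
def dmsTag (block_size n r : Int) : Int := PySem.Int.floordiv r (n * block_size)
-- the f-string 'Cache Line {i}: {hex(tag)}' / 'Cache Line {i}: Empty' (identical in both Pythons)
def dmsEntry (i : Int) (o : Option Int) : String :=
  match o with
  | none => "Cache Line " ++ PySem.Int.toStr i ++ ": Empty"
  | some t => "Cache Line " ++ PySem.Int.toStr i ++ ": " ++ pyHex t

-- ===== PORT A =====
-- A's per-reference loop body: state (cache, hits, misses, evictions)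
def dmsStepA (block_size n : Int) (s : List (Option Int) × Int × Int × Int) (r : Int) : List (Option Int) × Int × Int × Int :=
  let index := dmsIdx block_size n r
  let tag := dmsTag block_size n r
  if PySem.List.pyGetD s.1 index none == some tag then
    (s.1, s.2.1 + 1, s.2.2.1, s.2.2.2)
  else
    (PySem.List.pySetD s.1 index (some tag), s.2.1, s.2.2.1 + 1,
      if (PySem.List.pyGetD s.1 index none).isSome then s.2.2.2 + 1 else s.2.2.2)

-- A also computes num_offset_bits/num_index_bits/num_tag_bits (float log2), binary_address,
-- word_offset, results and access_order; none of them reaches the returned value, so they are not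
-- modelled — except that the log2 calls RAISE exactly when Pre_ below fails (that is Pre_'s role).
def direct_mapping_simulation (cache_size : Int) (memory_size : Int) (block_size : Int) (memory_references : List Int) : List String × List String × Int × Int × Int :=
  let num_cache_lines := PySem.Int.floordiv cache_size block_size
  let cache : List (Option Int) := List.replicate num_cache_lines.toNat none
  let before_cache := List.replicate num_cache_lines.toNat "-"
  let st := memory_references.foldl (dmsStepA block_size num_cache_lines) (cache, 0, 0, 0)
  let after_cache := (PySem.List.enumerate st.1 0).map (fun p => dmsEntry p.1 p.2)
  (before_cache, after_cache, st.2.1, st.2.2.1, st.2.2.2)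

-- ===== PORT B =====
-- B's inner per-tag step: state (stored, hits, misses, evictions)
def dmsStepLine (t : Option Int × Int × Int × Int) (tg : Int) : Option Int × Int × Int × Int :=
  if t.1 == some tg then (t.1, t.2.1 + 1, t.2.2.1, t.2.2.2)
  else (some tg, t.2.1, t.2.2.1 + 1, if t.1.isSome then t.2.2.2 + 1 else t.2.2.2)

def direct_mapping_simulation_alt (cache_size : Int) (memory_size : Int) (block_size : Int) (memory_references : List Int) : List String × List String × Int × Int × Int :=
  let num_cache_lines := PySem.Int.floordiv cache_size block_size
  -- groups.setdefault(index, []).append(tag)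
  let groups : PySem.Dict Int (List Int) := memory_references.foldl
    (fun d r => d.modify (dmsIdx block_size num_cache_lines r) []
      (· ++ [dmsTag block_size num_cache_lines r])) PySem.Dict.empty
  let st := (PySem.List.pyRange 0 num_cache_lines 1).foldl
    (fun (s : List String × Int × Int × Int) i =>
      let line := (groups.getD i []).foldl dmsStepLine (none, s.2.1, s.2.2.1, s.2.2.2)
      (s.1 ++ [dmsEntry i line.1], line.2.1, line.2.2.1, line.2.2.2)) ([], 0, 0, 0)
  let before_cache := List.replicate num_cache_lines.toNat "-"
  (before_cache, st.1, st.2.1, st.2.2.1, st.2.2.2)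

-- ===== PRECONDITION & SPEC =====
-- Pre_ excludes exactly the inputs where A raises: block_size = 0 (ZeroDivisionError) and the
-- non-positive arguments of the three log2 calls (ValueError/math domain error): it requires
-- block_size ≥ 1, memory_size ≥ 1 and num_cache_lines = cache_size // block_size ≥ 1.
def Pre_direct_mapping_simulation (cache_size : Int) (memory_size : Int) (block_size : Int) (memory_references : List Int) : Prop :=
  1 ≤ block_size ∧ 1 ≤ memory_size ∧ 1 ≤ PySem.Int.floordiv cache_size block_size
instance (cache_size : Int) (memory_size : Int) (block_size : Int) (memory_references : List Int) : Decidable (Pre_direct_mapping_simulation cache_size memory_size block_size memory_references) := by unfold Pre_direct_mapping_simulation; infer_instance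

def pvWitness_direct_mapping_simulation : Int × Int × Int × List Int := (8, 64, 2, [0, 1, 2, 8, 0])

def Spec_direct_mapping_simulation (cache_size : Int) (memory_size : Int) (block_size : Int) (memory_references : List Int) (out : List String × List String × Int × Int × Int) : Prop := out = direct_mapping_simulation_alt cache_size memory_size block_size memory_references
instance (cache_size : Int) (memory_size : Int) (block_size : Int) (memory_references : List Int) (out : List String × List String × Int × Int × Int) : Decidable (Spec_direct_mapping_simulation cache_size memory_size block_size memory_references out) := by unfold Spec_direct_mapping_simulation; infer_instance

-- ===== CLAIM (what is proved, stated in full; the proofs are below) =====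
def Claim_equal_direct_mapping_simulation : Prop := ∀ (cache_size : Int) (memory_size : Int) (block_size : Int) (memory_references : List Int), Dom_direct_mapping_simulation cache_size memory_size block_size memory_references → Pre_direct_mapping_simulation cache_size memory_size block_size memory_references → Spec_direct_mapping_simulation cache_size memory_size block_size memory_references (direct_mapping_simulation cache_size memory_size block_size memory_references)

-- ===== LEMMAS AND PROOFS =====

-- the ordered tag stream that cache line i receives
def dmsTags (bs n i : Int) (refs : List Int) : List Int :=
  (refs.filter (fun r => dmsIdx bs n r == i)).map (dmsTag bs n)

-- one line replayed from contents s0 with zeroed counters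
def dmsLineFrom (s0 : Option Int) (ts : List Int) : Option Int × Int × Int × Int :=
  ts.foldl dmsStepLine (s0, 0, 0, 0)

lemma getD_set_ite {α : Type} (l : List α) (j : Nat) (hj : j < l.length) (v d : α) (k : Nat) :
    (l.set j v).getD k d = if k = j then v else l.getD k d := by
  simp only [List.getD_eq_getElem?_getD, List.getElem?_set]
  by_cases hk : k = j
  · simp [hk, hj]
  · rw [if_neg (fun h => hk h.symm), if_neg hk]

lemma map_range_getD {α : Type} (l : List α) (d : α) :
    (List.range l.length).map (fun k => l[k]?.getD d) = l := by
  apply List.ext_getElem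
  · simp
  · intro i h1 h2; simp [List.getElem?_eq_getElem h2]

lemma sum_map_range_delta (L j : Nat) (hj : j < L) (f g : Nat → Int) (c : Int)
    (hfg : ∀ k, k < L → k ≠ j → f k = g k) (hf : f j = c + g j) :
    ((List.range L).map f).sum = c + ((List.range L).map g).sum := by
  have h1 : ∑ k ∈ Finset.range L, f k = c + ∑ k ∈ Finset.range L, g k := by
    have hc : ∀ k ∈ Finset.range L, f k = (if k = j then c else 0) + g k := by
      intro k hkL
      by_cases hk : k = j
      · subst hk; simp [hf]
      · simp [hk, hfg k (Finset.mem_range.mp hkL) hk]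
    rw [Finset.sum_congr rfl hc, Finset.sum_add_distrib,
      Finset.sum_ite_eq' (Finset.range L) j (fun _ => c)]
    simp [Finset.mem_range.mpr hj]
  simpa using h1

-- counters thread additively through dmsStepLine
lemma dmsStep_shift (st : Option Int × Int × Int × Int) (t : Int) :
    dmsStepLine st t = ((dmsStepLine (st.1, 0, 0, 0) t).1,
      st.2.1 + (dmsStepLine (st.1, 0, 0, 0) t).2.1,
      st.2.2.1 + (dmsStepLine (st.1, 0, 0, 0) t).2.2.1,
      st.2.2.2 + (dmsStepLine (st.1, 0, 0, 0) t).2.2.2) := by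
  simp only [dmsStepLine]
  by_cases hs : st.1 == some t <;> by_cases h2 : st.1.isSome <;>
    simp [hs, h2]

lemma dmsLine_shift : ∀ (ts : List Int) (st : Option Int × Int × Int × Int),
    ts.foldl dmsStepLine st =
      ((dmsLineFrom st.1 ts).1, st.2.1 + (dmsLineFrom st.1 ts).2.1,
       st.2.2.1 + (dmsLineFrom st.1 ts).2.2.1, st.2.2.2 + (dmsLineFrom st.1 ts).2.2.2)
  | [], st => by simp [dmsLineFrom]
  | t :: ts, st => by
      have hR : dmsLineFrom st.1 (t :: ts) =
          ((dmsLineFrom (dmsStepLine (st.1, 0, 0, 0) t).1 ts).1,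
           (dmsStepLine (st.1, 0, 0, 0) t).2.1 + (dmsLineFrom (dmsStepLine (st.1, 0, 0, 0) t).1 ts).2.1,
           (dmsStepLine (st.1, 0, 0, 0) t).2.2.1 + (dmsLineFrom (dmsStepLine (st.1, 0, 0, 0) t).1 ts).2.2.1,
           (dmsStepLine (st.1, 0, 0, 0) t).2.2.2 + (dmsLineFrom (dmsStepLine (st.1, 0, 0, 0) t).1 ts).2.2.2) := by
        rw [dmsLineFrom, List.foldl_cons, dmsLine_shift ts (dmsStepLine (st.1, 0, 0, 0) t)]
      rw [List.foldl_cons, dmsLine_shift ts (dmsStepLine st t), hR, dmsStep_shift st t]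
      simp only [Prod.mk.injEq]
      repeat' apply And.intro
      all_goals first | trivial | ring

lemma dmsLineFrom_cons_hit (s0 : Option Int) (t0 : Int) (ts : List Int) (h : s0 = some t0) :
    dmsLineFrom s0 (t0 :: ts) =
      ((dmsLineFrom s0 ts).1, 1 + (dmsLineFrom s0 ts).2.1,
       (dmsLineFrom s0 ts).2.2.1, (dmsLineFrom s0 ts).2.2.2) := by
  have hstep : dmsStepLine (s0, 0, 0, 0) t0 = (s0, 1, 0, 0) := by simp [dmsStepLine, h]
  rw [dmsLineFrom, List.foldl_cons, hstep, dmsLine_shift ts (s0, 1, 0, 0)]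
  simp [dmsLineFrom]

lemma dmsLineFrom_cons_miss (s0 : Option Int) (t0 : Int) (ts : List Int) (h : ¬ s0 = some t0) :
    dmsLineFrom s0 (t0 :: ts) =
      ((dmsLineFrom (some t0) ts).1, (dmsLineFrom (some t0) ts).2.1,
       1 + (dmsLineFrom (some t0) ts).2.2.1,
       (if s0.isSome then 1 else 0) + (dmsLineFrom (some t0) ts).2.2.2) := by
  have hstep : dmsStepLine (s0, 0, 0, 0) t0 = (some t0, 0, 1, if s0.isSome then 1 else 0) := by
    simp only [dmsStepLine]
    rw [if_neg (by simpa using h)]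
    by_cases hs0 : s0.isSome <;> simp [hs0]
  rw [dmsLineFrom, List.foldl_cons, hstep, dmsLine_shift ts (some t0, 0, 1, if s0.isSome then 1 else 0)]
  simp only [Prod.mk.injEq, dmsLineFrom]
  repeat' apply And.intro
  all_goals first | trivial | ring

lemma dmsTags_cons (bs n i r : Int) (refs : List Int) :
    dmsTags bs n i (r :: refs) =
      if dmsIdx bs n r = i then dmsTag bs n r :: dmsTags bs n i refs else dmsTags bs n i refs := by
  simp only [dmsTags, List.filter_cons]
  by_cases hi : dmsIdx bs n r = i <;> simp [hi]

lemma getElem_enumerate {α : Type} : ∀ (l : List α) (s : Int) (k : Nat) (hk : k < l.length),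
    (PySem.List.enumerate l s)[k]'(by rw [PySem.List.length_enumerate]; exact hk) = (s + k, l[k])
  | x :: l, s, 0, hk => by simp [PySem.List.enumerate_cons]
  | x :: l, s, k+1, hk => by
    have ih := getElem_enumerate l (s+1) k (by simpa using hk)
    simp only [PySem.List.enumerate_cons, List.getElem_cons_succ, ih, Prod.mk.injEq]
    repeat' apply And.intro
    all_goals first | trivial | rfl | (push_cast; ring)

lemma groups_getD (bs n : Int) (refs : List Int) (c : Int) :
    (refs.foldl (fun d r => d.modify (dmsIdx bs n r) []
        (· ++ [dmsTag bs n r])) PySem.Dict.empty).getD c [] = dmsTags bs n c refs := by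
  rw [← List.foldl_map (f := fun r => (dmsIdx bs n r, dmsTag bs n r))
        (g := fun (d : PySem.Dict Int (List Int)) p => d.modify p.1 [] (· ++ [p.2]))]
  rw [PySem.Dict.getD_foldl_modify_append]
  simp [dmsTags, List.filter_map, Function.comp_def, List.map_map]

lemma foldA_char (bs n : Int) (hn : 0 < n) :
    ∀ (refs : List Int) (cache : List (Option Int)) (h m e : Int), (cache.length : Int) = n →
    refs.foldl (dmsStepA bs n) (cache, h, m, e) =
      ((List.range cache.length).map (fun k => (dmsLineFrom (cache.getD k none) (dmsTags bs n (k : Int) refs)).1),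
       h + ((List.range cache.length).map (fun k => (dmsLineFrom (cache.getD k none) (dmsTags bs n (k : Int) refs)).2.1)).sum,
       m + ((List.range cache.length).map (fun k => (dmsLineFrom (cache.getD k none) (dmsTags bs n (k : Int) refs)).2.2.1)).sum,
       e + ((List.range cache.length).map (fun k => (dmsLineFrom (cache.getD k none) (dmsTags bs n (k : Int) refs)).2.2.2)).sum)
  | [], cache, h, m, e, hlen => by
      simp [dmsTags, dmsLineFrom, List.getD_eq_getElem?_getD]
      exact (map_range_getD cache none).symm
  | r :: refs, cache, h, m, e, hlen => by
      have hi0 : 0 ≤ dmsIdx bs n r := PySem.Int.mod_nonneg _ hn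
      have hi1 : dmsIdx bs n r < n := PySem.Int.mod_lt _ hn
      set j := (dmsIdx bs n r).toNat with hjdef
      have hcast : ((j : Nat) : Int) = dmsIdx bs n r := Int.toNat_of_nonneg hi0
      have hjlt : j < cache.length := by omega
      have hpg : PySem.List.pyGetD cache (dmsIdx bs n r) none = cache.getD j none := by
        rw [← hcast, PySem.List.pyGetD_natCast]
      have hps : PySem.List.pySetD cache (dmsIdx bs n r) (some (dmsTag bs n r)) =
          cache.set j (some (dmsTag bs n r)) := by
        rw [← hcast, PySem.List.pySetD_natCast]
      have htags : ∀ k : Nat,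
          dmsTags bs n (k : Int) (r :: refs) =
            if k = j then dmsTag bs n r :: dmsTags bs n (k : Int) refs
            else dmsTags bs n (k : Int) refs := by
        intro k
        rw [dmsTags_cons]
        by_cases hkj : k = j
        · rw [if_pos (by rw [← hcast, hkj]), if_pos hkj]
        · rw [if_neg (by rw [← hcast]; exact fun hh => hkj (by exact_mod_cast hh.symm)), if_neg hkj]
      rw [List.foldl_cons]
      by_cases hhit : cache.getD j none == some (dmsTag bs n r)
      · have hs0 : cache.getD j none = some (dmsTag bs n r) := by simpa using hhit
        have hstep : dmsStepA bs n (cache, h, m, e) r = (cache, h + 1, m, e) := by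
          simp only [dmsStepA, hpg, hhit, if_true]
        rw [hstep, foldA_char bs n hn refs cache (h+1) m e hlen]
        have hone : ∀ (F : (Option Int × Int × Int × Int) → Int) (c : Int),
            (∀ k : Nat, F (dmsLineFrom (cache.getD k none) (dmsTags bs n (k : Int) (r :: refs))) =
              (if k = j then c else 0) + F (dmsLineFrom (cache.getD k none) (dmsTags bs n (k : Int) refs))) →
            ((List.range cache.length).map (fun k =>
                F (dmsLineFrom (cache.getD k none) (dmsTags bs n (k : Int) (r :: refs))))).sum =
              c + ((List.range cache.length).map (fun k =>
                F (dmsLineFrom (cache.getD k none) (dmsTags bs n (k : Int) refs)))).sum := by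
          intro F c hF
          refine sum_map_range_delta cache.length j hjlt _ _ c ?_ ?_
          · intro k _ hkj; rw [hF k, if_neg hkj]; ring
          · rw [hF j, if_pos rfl]
        simp only [Prod.mk.injEq]
        refine ⟨?_, ?_, ?_, ?_⟩
        · apply List.map_congr_left
          intro k hk
          rw [htags k]
          by_cases hkj : k = j
          · subst hkj; rw [if_pos rfl, dmsLineFrom_cons_hit _ _ _ hs0]
          · rw [if_neg hkj]
        · rw [hone (fun p => p.2.1) 1 ?_]
          · ring
          · intro k; rw [htags k]
            by_cases hkj : k = j
            · subst hkj; rw [if_pos rfl, if_pos rfl, dmsLineFrom_cons_hit _ _ _ hs0]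
            · rw [if_neg hkj, if_neg hkj]; ring
        · rw [hone (fun p => p.2.2.1) 0 ?_]
          · ring
          · intro k; rw [htags k]
            by_cases hkj : k = j
            · subst hkj; rw [if_pos rfl, if_pos rfl, dmsLineFrom_cons_hit _ _ _ hs0]; ring
            · rw [if_neg hkj, if_neg hkj]; ring
        · rw [hone (fun p => p.2.2.2) 0 ?_]
          · ring
          · intro k; rw [htags k]
            by_cases hkj : k = j
            · subst hkj; rw [if_pos rfl, if_pos rfl, dmsLineFrom_cons_hit _ _ _ hs0]; ring
            · rw [if_neg hkj, if_neg hkj]; ring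
      · have hs0 : ¬ cache.getD j none = some (dmsTag bs n r) := by simpa using hhit
        set cache' := cache.set j (some (dmsTag bs n r)) with hc'
        have hlen' : (cache'.length : Int) = n := by simp [hc', hlen]
        have hget' : ∀ k : Nat, k < cache.length →
            cache'.getD k none = if k = j then some (dmsTag bs n r) else cache.getD k none := by
          intro k _; exact getD_set_ite cache j hjlt _ none k
        have hstep : dmsStepA bs n (cache, h, m, e) r =
            (cache', h, m + 1, if (cache.getD j none).isSome then e + 1 else e) := by
          simp only [dmsStepA, hpg, hps, hhit, if_false, Bool.false_eq_true, hc']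
        rw [hstep, foldA_char bs n hn refs cache' h (m+1) (if (cache.getD j none).isSome then e + 1 else e) hlen']
        have hlencc : cache'.length = cache.length := by simp [hc']
        have honeM : ∀ (F : (Option Int × Int × Int × Int) → Int) (c : Int),
            (∀ k : Nat, k < cache.length →
              F (dmsLineFrom (cache.getD k none) (dmsTags bs n (k : Int) (r :: refs))) =
                (if k = j then c else 0) + F (dmsLineFrom (cache'.getD k none) (dmsTags bs n (k : Int) refs))) →
            ((List.range cache.length).map (fun k =>
                F (dmsLineFrom (cache.getD k none) (dmsTags bs n (k : Int) (r :: refs))))).sum =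
              c + ((List.range cache.length).map (fun k =>
                F (dmsLineFrom (cache'.getD k none) (dmsTags bs n (k : Int) refs)))).sum := by
          intro F c hF
          refine sum_map_range_delta cache.length j hjlt _ _ c ?_ ?_
          · intro k hkL hkj; rw [hF k hkL, if_neg hkj]; ring
          · rw [hF j hjlt, if_pos rfl]
        have hKey : ∀ k : Nat, k < cache.length →
            dmsLineFrom (cache.getD k none) (dmsTags bs n (k : Int) (r :: refs)) =
              if k = j then
                ((dmsLineFrom (cache'.getD k none) (dmsTags bs n (k : Int) refs)).1,
                 (dmsLineFrom (cache'.getD k none) (dmsTags bs n (k : Int) refs)).2.1,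
                 1 + (dmsLineFrom (cache'.getD k none) (dmsTags bs n (k : Int) refs)).2.2.1,
                 (if (cache.getD j none).isSome then (1:Int) else 0) +
                   (dmsLineFrom (cache'.getD k none) (dmsTags bs n (k : Int) refs)).2.2.2)
              else dmsLineFrom (cache'.getD k none) (dmsTags bs n (k : Int) refs) := by
          intro k hkL
          rw [htags k, hget' k hkL]
          by_cases hkj : k = j
          · subst hkj
            rw [if_pos rfl, if_pos rfl, if_pos rfl, dmsLineFrom_cons_miss _ _ _ hs0]
          · rw [if_neg hkj, if_neg hkj, if_neg hkj]
        simp only [Prod.mk.injEq, hlencc]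
        refine ⟨?_, ?_, ?_, ?_⟩
        · symm
          apply List.map_congr_left
          intro k hk
          have hkL := List.mem_range.mp hk
          rw [hKey k hkL]
          by_cases hkj : k = j
          · subst hkj; rw [if_pos rfl]
          · rw [if_neg hkj]
        · rw [honeM (fun p => p.2.1) 0 ?_]
          · ring
          · intro k hkL; rw [hKey k hkL]
            by_cases hkj : k = j
            · subst hkj; rw [if_pos rfl, if_pos rfl]; ring
            · rw [if_neg hkj, if_neg hkj]; ring
        · rw [honeM (fun p => p.2.2.1) 1 ?_]
          · ring
          · intro k hkL; rw [hKey k hkL]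
            by_cases hkj : k = j
            · subst hkj; rw [if_pos rfl, if_pos rfl]
            · rw [if_neg hkj, if_neg hkj]; ring
        · rw [honeM (fun p => p.2.2.2) (if (cache.getD j none).isSome then 1 else 0) ?_]
          · split_ifs <;> ring
          · intro k hkL; rw [hKey k hkL]
            by_cases hkj : k = j
            · subst hkj; rw [if_pos rfl, if_pos rfl]
            · rw [if_neg hkj, if_neg hkj]; ring

lemma foldB_char (bs n : Int) (refs : List Int) :
    ∀ (L : List Int) (acc : List String) (h m e : Int),
    L.foldl (fun (s : List String × Int × Int × Int) i =>
        let line := (dmsTags bs n i refs).foldl dmsStepLine (none, s.2.1, s.2.2.1, s.2.2.2)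
        (s.1 ++ [dmsEntry i line.1], line.2.1, line.2.2.1, line.2.2.2)) (acc, h, m, e)
      = (acc ++ L.map (fun i => dmsEntry i (dmsLineFrom none (dmsTags bs n i refs)).1),
         h + (L.map (fun i => (dmsLineFrom none (dmsTags bs n i refs)).2.1)).sum,
         m + (L.map (fun i => (dmsLineFrom none (dmsTags bs n i refs)).2.2.1)).sum,
         e + (L.map (fun i => (dmsLineFrom none (dmsTags bs n i refs)).2.2.2)).sum)
  | [], acc, h, m, e => by simp
  | i :: L, acc, h, m, e => by
      rw [List.foldl_cons]
      show List.foldl _ (acc ++ [dmsEntry i ((dmsTags bs n i refs).foldl dmsStepLine (none, h, m, e)).1],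
        ((dmsTags bs n i refs).foldl dmsStepLine (none, h, m, e)).2.1,
        ((dmsTags bs n i refs).foldl dmsStepLine (none, h, m, e)).2.2.1,
        ((dmsTags bs n i refs).foldl dmsStepLine (none, h, m, e)).2.2.2) L = _
      rw [dmsLine_shift (dmsTags bs n i refs) (none, h, m, e)]
      rw [foldB_char bs n refs L _ _ _ _]
      simp only [Prod.mk.injEq, List.map_cons, List.sum_cons]
      refine ⟨by simp, by ring, by ring, by ring⟩


-- ===== VERDICT (by name: the statement is the Claim_ definition above) =====
theorem direct_mapping_simulation_spec : Claim_equal_direct_mapping_simulation := by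
  intro cs ms bs refs hdom hpre
  obtain ⟨hbs, hms, hncl⟩ := hpre
  unfold Spec_direct_mapping_simulation direct_mapping_simulation direct_mapping_simulation_alt
  set n := PySem.Int.floordiv cs bs with hndef
  have hn : 0 < n := by omega
  have hN : ((n.toNat : Nat) : Int) = n := Int.toNat_of_nonneg (by omega)
  have hlen : ((List.replicate n.toNat (none : Option Int)).length : Int) = n := by simp [hN]
  have hrep : ∀ k : Nat, (List.replicate n.toNat (none : Option Int)).getD k none = none := by
    intro k; simp [List.getD_eq_getElem?_getD, List.getElem?_replicate]; split <;> rfl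
  simp only []
  rw [foldA_char bs n hn refs (List.replicate n.toNat none) 0 0 0 hlen]
  have hg : ∀ c : Int, (refs.foldl (fun d r => d.modify (dmsIdx bs n r) []
      (· ++ [dmsTag bs n r])) PySem.Dict.empty).getD c [] = dmsTags bs n c refs :=
    groups_getD bs n refs
  simp only [hg]
  rw [foldB_char bs n refs (PySem.List.pyRange 0 n 1) [] 0 0 0]
  simp only [hrep, List.length_replicate, List.nil_append]
  have hBmap : ∀ {β : Type} (F : Int → β), List.map F (PySem.List.pyRange 0 n 1) =
      List.map (fun k : Nat => F (k : Int)) (List.range n.toNat) := by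
    intro β F
    rw [PySem.List.pyRange_one, List.map_map]
    simp [Function.comp_def]
  simp only [Prod.mk.injEq]
  refine ⟨trivial, ?_, ?_, ?_, ?_⟩
  · rw [hBmap]
    apply List.ext_getElem
    · simp [PySem.List.length_enumerate]
    · intro k h1 h2
      have hL0 : k < (List.map (fun k : Nat =>
          (dmsLineFrom none (dmsTags bs n (k : Int) refs)).1) (List.range n.toNat)).length := by
        simpa using h2
      rw [List.getElem_map, List.getElem_map, getElem_enumerate _ 0 k hL0]
      simp
  · rw [hBmap]
  · rw [hBmap]
  · rw [hBmap]
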